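-- pv_equiv track=rewrite | github.com/upcliu/GCCL | diff2token.py | mark_token
-- ===== SOURCE A (Python) =====
-- def mark_token(marklist, tokenlist, attlist):
--     lineNum = 0
--     diff_mark = list()
--     for i in tokenlist:
--         lenght=len(marklist)
--         if lineNum >= lenght:
--             break
--         diff_mark.append(marklist[lineNum])
--         if i == '<nl>':
--             lineNum += 1
--     while lineNum < len(marklist):
--         diff_mark.append(marklist[lineNum])
--         tokenlist.append('<nl>')
--         attlist.append([])
--         lineNum += 1
--     return diff_mark, tokenlist, attlist
-- ===== SOURCE B (Python) =====
-- # B: group-count decomposition -- count tokens per newline-terminated line first,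
-- # then emit each mark replicated per group, then pad; same in-place mutation of
-- # tokenlist/attlist as A.
-- def mark_token(marklist, tokenlist, attlist):
--     m = len(marklist)
--     sizes = []
--     cur = 0
--     for t in tokenlist:
--         if t == '<nl>':
--             sizes.append(cur + 1)
--             cur = 0
--         else:
--             cur += 1
--     nl = len(sizes)
--     diff_mark = []
--     for g in range(min(nl, m)):
--         diff_mark.extend([marklist[g]] * sizes[g])
--     if nl < m and cur != 0:
--         diff_mark.extend([marklist[nl]] * cur)
--     for g in range(min(nl, m), m):
--         diff_mark.append(marklist[g])
--         tokenlist.append('<nl>')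
--         attlist.append([])
--     return diff_mark, tokenlist, attlist
-- ===== Notes on version B (the rewrite author's own statement) =====
-- stated objective: alternative
-- what changed: Replaces A's single token-by-token walk (carrying lineNum and appending one mark per token) with a two-phase decomposition: first compute per-line token group sizes by scanning for '<nl>', then emit each mark replicated by its group size, then a range-driven padding pass; same in-place appends to tokenlist/attlist.
import Mathlib
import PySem

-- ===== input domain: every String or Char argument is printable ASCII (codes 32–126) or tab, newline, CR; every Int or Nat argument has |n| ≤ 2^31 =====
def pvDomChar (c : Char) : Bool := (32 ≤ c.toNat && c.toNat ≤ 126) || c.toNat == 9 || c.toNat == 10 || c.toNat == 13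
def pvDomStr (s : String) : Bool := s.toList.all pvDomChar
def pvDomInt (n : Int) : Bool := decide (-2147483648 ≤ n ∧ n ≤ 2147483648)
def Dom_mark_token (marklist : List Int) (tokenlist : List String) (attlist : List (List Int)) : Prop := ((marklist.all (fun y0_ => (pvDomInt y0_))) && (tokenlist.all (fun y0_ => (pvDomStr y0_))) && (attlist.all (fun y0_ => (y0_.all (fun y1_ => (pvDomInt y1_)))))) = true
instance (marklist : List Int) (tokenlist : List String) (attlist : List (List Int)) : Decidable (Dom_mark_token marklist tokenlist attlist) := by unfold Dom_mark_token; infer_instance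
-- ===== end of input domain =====

-- ===== PORT A =====
-- A: one token-by-token loop carrying lineNum, then a while-loop padding phase.
-- In-place note: both Pythons append to tokenlist/attlist; equivalence here is about the return value.
def mtA_loop (marklist : List Int) : List String → Nat → List Int → Nat × List Int
  | [], n, acc => (n, acc)
  | t :: ts, n, acc =>
    if marklist.length ≤ n then (n, acc)
    else mtA_loop marklist ts (if t = "<nl>" then n + 1 else n) (acc ++ [marklist.getD n 0])

def mtA_pad (marklist : List Int) (n : Nat) (dm : List Int) (tl : List String)
    (al : List (List Int)) : List Int × List String × List (List Int) :=
  if n < marklist.length then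
    mtA_pad marklist (n + 1) (dm ++ [marklist.getD n 0]) (tl ++ ["<nl>"]) (al ++ [[]])
  else (dm, tl, al)
termination_by marklist.length - n

def mark_token (marklist : List Int) (tokenlist : List String) (attlist : List (List Int)) :
    List Int × List String × List (List Int) :=
  let p := mtA_loop marklist tokenlist 0 []
  mtA_pad marklist p.1 p.2 tokenlist attlist

-- ===== PORT B =====
-- B (from Source B): compute per-line token group sizes, replicate marks per group, then range padding.
def mark_token_alt (marklist : List Int) (tokenlist : List String) (attlist : List (List Int)) :
    List Int × List String × List (List Int) :=
  let m := marklist.length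
  let p := tokenlist.foldl
    (fun (p : List Nat × Nat) t => if t = "<nl>" then (p.1 ++ [p.2 + 1], 0) else (p.1, p.2 + 1))
    ([], 0)
  let sizes := p.1
  let cur := p.2
  let nl := sizes.length
  let dm0 := (List.range (min nl m)).foldl
    (fun acc g => acc ++ List.replicate (sizes.getD g 0) (marklist.getD g 0)) []
  let dm1 := if nl < m ∧ cur ≠ 0 then dm0 ++ List.replicate cur (marklist.getD nl 0) else dm0
  (List.range' (min nl m) (m - min nl m)).foldl
    (fun (st : List Int × List String × List (List Int)) g =>
      (st.1 ++ [marklist.getD g 0], st.2.1 ++ ["<nl>"], st.2.2 ++ [[]]))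
    (dm1, tokenlist, attlist)

-- ===== PRECONDITION & SPEC =====
def Spec_mark_token (marklist : List Int) (tokenlist : List String) (attlist : List (List Int)) (out : List Int × List String × List (List Int)) : Prop := out = mark_token_alt marklist tokenlist attlist
instance (marklist : List Int) (tokenlist : List String) (attlist : List (List Int)) (out : List Int × List String × List (List Int)) : Decidable (Spec_mark_token marklist tokenlist attlist out) := by unfold Spec_mark_token; infer_instance

-- ===== CLAIM (what is proved, stated in full; the proofs are below) =====
def Claim_equal_mark_token : Prop := ∀ (marklist : List Int) (tokenlist : List String) (attlist : List (List Int)), Dom_mark_token marklist tokenlist attlist → Spec_mark_token marklist tokenlist attlist (mark_token marklist tokenlist attlist)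

-- ===== LEMMAS AND PROOFS =====

-- recursive form of B's sizes scan
def sizesAux : List String → Nat → List Nat × Nat
  | [], cur => ([], cur)
  | t :: ts, cur =>
    if t = "<nl>" then ((cur + 1) :: (sizesAux ts 0).1, (sizesAux ts 0).2)
    else sizesAux ts (cur + 1)

-- the diff_mark contribution of A's token loop starting at line n
def fA (M : List Int) : List String → Nat → List Int
  | [], _ => []
  | t :: ts, n =>
    if n < M.length then M.getD n 0 :: fA M ts (if t = "<nl>" then n + 1 else n) else []

-- B's diff_mark expression generalized with a line offset n
def Bdm (M : List Int) (ss : List Nat) (cur n : Nat) : List Int :=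
  (List.range (min ss.length (M.length - n))).flatMap
    (fun g => List.replicate (ss.getD g 0) (M.getD (n + g) 0))
  ++ (if ss.length < M.length - n ∧ cur ≠ 0 then List.replicate cur (M.getD (n + ss.length) 0) else [])

lemma sizes_foldl (ts : List String) : ∀ acc cur,
    ts.foldl (fun (p : List Nat × Nat) t =>
      if t = "<nl>" then (p.1 ++ [p.2 + 1], 0) else (p.1, p.2 + 1)) (acc, cur)
    = (acc ++ (sizesAux ts cur).1, (sizesAux ts cur).2) := by
  induction ts with
  | nil => intro acc cur; simp [sizesAux]
  | cons t ts ih =>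
    intro acc cur
    by_cases h : t = "<nl>" <;> simp [sizesAux, h, ih]

lemma sizesAux_len (ts : List String) : ∀ cur, (sizesAux ts cur).1.length = ts.count "<nl>" := by
  induction ts with
  | nil => intro cur; simp [sizesAux]
  | cons t ts ih =>
    intro cur
    by_cases h : t = "<nl>" <;> simp [sizesAux, h, ih]

lemma Bdm_ge (M : List Int) (ss : List Nat) (cur n : Nat) (h : M.length ≤ n) :
    Bdm M ss cur n = [] := by
  have h0 : M.length - n = 0 := by omega
  simp [Bdm, h0]

lemma Bdm_cons (M : List Int) (s : Nat) (ss : List Nat) (cur n : Nat) (h : n < M.length) :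
    Bdm M (s :: ss) cur n = List.replicate s (M.getD n 0) ++ Bdm M ss cur (n + 1) := by
  have h1 : min (s :: ss).length (M.length - n) = min ss.length (M.length - (n + 1)) + 1 := by
    simp only [List.length_cons]; omega
  have h2 : ((s :: ss).length < M.length - n ∧ cur ≠ 0)
      = (ss.length < M.length - (n + 1) ∧ cur ≠ 0) := by
    simp only [List.length_cons, eq_iff_iff]
    constructor <;> rintro ⟨a, b⟩ <;> exact ⟨by omega, b⟩
  unfold Bdm
  rw [h1, List.range_succ_eq_map, List.flatMap_cons, List.flatMap_map]
  simp only [h2]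
  rw [List.append_assoc]
  congr 1
  rw [show n + (s :: ss).length = n + 1 + ss.length from by simp; omega]
  congr 1
  apply List.flatMap_congr
  intro g _
  rw [show (s :: ss).getD g.succ 0 = ss.getD g 0 from rfl,
    show n + g.succ = n + 1 + g from by omega]

lemma main_lemma (M : List Int) (ts : List String) : ∀ cur n,
    (if n < M.length then List.replicate cur (M.getD n 0) else []) ++ fA M ts n
    = Bdm M (sizesAux ts cur).1 (sizesAux ts cur).2 n := by
  induction ts with
  | nil =>
    intro cur n
    by_cases hn : n < M.length
    · by_cases hc : cur = 0 <;>
        simp [sizesAux, Bdm, fA, hn, hc, show 0 < M.length - n by omega]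
    · simp [sizesAux, Bdm, fA, hn, show M.length - n = 0 by omega]
  | cons t ts ih =>
    intro cur n
    by_cases hn : n < M.length
    · by_cases h : t = "<nl>"
      · subst h
        have hs : sizesAux ("<nl>" :: ts) cur
            = ((cur + 1) :: (sizesAux ts 0).1, (sizesAux ts 0).2) := by simp [sizesAux]
        rw [hs]
        show _ = Bdm M ((cur + 1) :: (sizesAux ts 0).1) (sizesAux ts 0).2 n
        rw [Bdm_cons M _ _ _ n hn, ← ih 0 (n + 1)]
        simp [fA, hn, List.replicate_succ']
      · have hs : sizesAux (t :: ts) cur = sizesAux ts (cur + 1) := by simp [sizesAux, h]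
        rw [hs, ← ih (cur + 1) n]
        simp [fA, hn, h, List.replicate_succ']
    · have hfa : fA M (t :: ts) n = [] := by simp [fA, hn]
      rw [Bdm_ge M _ _ n (by omega), hfa]
      simp [hn]

lemma fA_replaces (M : List Int) (ts : List String) :
    fA M ts 0 = Bdm M (sizesAux ts 0).1 (sizesAux ts 0).2 0 := by
  have := main_lemma M ts 0 0
  simpa using this

lemma loopA (M : List Int) (ts : List String) : ∀ n acc, n ≤ M.length →
    mtA_loop M ts n acc = (min (n + ts.count "<nl>") M.length, acc ++ fA M ts n) := by
  induction ts with
  | nil => intro n acc h; simp [mtA_loop, fA]; omega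
  | cons t ts ih =>
    intro n acc h
    by_cases hn : M.length ≤ n
    · have hne : n = M.length := by omega
      simp [mtA_loop, fA, hne]
    · have hn' : n < M.length := by omega
      by_cases ht : t = "<nl>"
      · rw [show mtA_loop M (t :: ts) n acc
            = mtA_loop M ts (n + 1) (acc ++ [M.getD n 0]) by simp [mtA_loop, hn, ht]]
        rw [ih (n + 1) _ (by omega)]
        simp only [fA, if_pos hn', ht, List.count_cons, Prod.mk.injEq]
        refine ⟨by simp; omega, by simp⟩
      · rw [show mtA_loop M (t :: ts) n acc
            = mtA_loop M ts n (acc ++ [M.getD n 0]) by simp [mtA_loop, hn, ht]]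
        rw [ih n _ (by omega)]
        simp only [fA, if_pos hn', ht, List.count_cons, Prod.mk.injEq]
        refine ⟨by simp [ht], by simp⟩

lemma padA (M : List Int) : ∀ k n dm tl al, M.length - n ≤ k →
    mtA_pad M n dm tl al
    = (List.range' n (M.length - n)).foldl
        (fun (st : List Int × List String × List (List Int)) g =>
          (st.1 ++ [M.getD g 0], st.2.1 ++ ["<nl>"], st.2.2 ++ [[]])) (dm, tl, al) := by
  intro k
  induction k with
  | zero =>
    intro n dm tl al h
    have hn : ¬ n < M.length := by omega
    rw [mtA_pad]
    simp [hn, show M.length - n = 0 by omega]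
  | succ k ih =>
    intro n dm tl al h
    by_cases hn : n < M.length
    · rw [mtA_pad]
      simp only [hn, if_pos]
      rw [ih (n + 1) _ _ _ (by omega)]
      have : M.length - n = (M.length - (n + 1)) + 1 := by omega
      rw [this, List.range'_succ]
      simp
    · rw [mtA_pad]
      simp [hn, show M.length - n = 0 by omega]

lemma foldl_append_replicate (M : List Int) (ss : List Nat) (l : List Nat) :
    ∀ acc : List Int,
    l.foldl (fun acc g => acc ++ List.replicate (ss.getD g 0) (M.getD g 0)) acc
    = acc ++ l.flatMap (fun g => List.replicate (ss.getD g 0) (M.getD g 0)) := by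
  induction l with
  | nil => intro acc; simp
  | cons x l ih => intro acc; simp [List.append_assoc, List.flatMap_def]

-- ===== VERDICT (by name: the statement is the Claim_ definition above) =====
theorem mark_token_spec : Claim_equal_mark_token := by
  intro M ts al _
  unfold Spec_mark_token mark_token mark_token_alt
  have hloop := loopA M ts 0 [] (Nat.zero_le _)
  have hsz := sizes_foldl ts [] 0
  simp only [hsz, List.nil_append]
  set ss := (sizesAux ts 0).1 with hss
  set c := (sizesAux ts 0).2 with hc
  have hlen : ss.length = ts.count "<nl>" := sizesAux_len ts 0
  simp only [hloop, Nat.zero_add, List.nil_append]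
  rw [padA M (M.length) _ _ _ _ (by omega)]
  have hmin : min (ts.count "<nl>") M.length = min ss.length M.length := by rw [hlen]
  rw [hmin]
  congr 1
  -- dm sides agree
  rw [fA_replaces M ts, ← hss, ← hc]
  rw [foldl_append_replicate M ss (List.range (min ss.length M.length)) []]
  simp only [List.nil_append, Bdm, Nat.sub_zero, Nat.zero_add]
  by_cases hcond : ss.length < M.length ∧ c ≠ 0
  · simp [hcond]
  · simp [hcond]
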